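-- pv_equiv track=rewrite | github.com/SunsettiaSama/Algorithm_Learning | 1-数组/A3-超大型数组/Z-3-超级上升数-字节真题.py | isSupperUpper
-- ===== SOURCE A (Python) =====
-- def isSupperUpper(num):
--
--     temp = str(num * num)
--
--     # 超级上升数也不能大于10 ** 10
--     if len(temp) > 10:
--         return False
--
--     for index in range(1, len(temp)):
--         if not temp[index] > temp[index - 1]:
--             return False
--
--     return True
-- ===== SOURCE B (Python) =====
-- def isSupperUpper(num):
--     temp = str(num * num)
--     if len(temp) > 10:
--         return False
--     return list(temp) == sorted(set(temp))
-- ===== Notes on version B (the rewrite author's own statement) =====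
-- stated objective: idiomatic
-- what changed: Replaces the index-based adjacent-pair scanning loop with a sort-based check: the digits are strictly increasing iff the character list equals the sorted list of its distinct characters.
import Mathlib
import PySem

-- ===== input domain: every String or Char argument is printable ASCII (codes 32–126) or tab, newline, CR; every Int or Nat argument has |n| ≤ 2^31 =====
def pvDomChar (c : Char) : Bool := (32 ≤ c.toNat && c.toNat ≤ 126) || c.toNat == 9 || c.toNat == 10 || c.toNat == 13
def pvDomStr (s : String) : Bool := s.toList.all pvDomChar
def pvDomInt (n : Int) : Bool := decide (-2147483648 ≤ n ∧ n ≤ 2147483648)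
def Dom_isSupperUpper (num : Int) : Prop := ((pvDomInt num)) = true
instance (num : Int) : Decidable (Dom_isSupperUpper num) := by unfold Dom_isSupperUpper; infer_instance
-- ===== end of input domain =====

-- B replaces A's index-based adjacent-pair scan with a sort-based check (list(temp) == sorted(set(temp))): idiomatic, not claimed faster.

-- ===== PORT A =====
def isSupperUpper (num : Int) : Bool :=
  let temp := PySem.Int.toChars (num * num)
  if temp.length > 10 then false
  else
    (PySem.List.pyRange 1 temp.length 1).all
      (fun index => decide (PySem.List.pyGetD temp (index - 1) ' ' < PySem.List.pyGetD temp index ' '))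

-- ===== PORT B =====
def isSupperUpper_alt (num : Int) : Bool :=
  let temp := PySem.Int.toChars (num * num)
  if temp.length > 10 then false
  else decide (temp = PySem.List.sorted (PySem.Set.ofList temp) (fun c => c) false)

-- ===== PRECONDITION & SPEC =====
def Spec_isSupperUpper (num : Int) (out : Bool) : Prop := out = isSupperUpper_alt num
instance (num : Int) (out : Bool) : Decidable (Spec_isSupperUpper num out) := by unfold Spec_isSupperUpper; infer_instance

-- ===== CLAIM (what is proved, stated in full; the proofs are below) =====
def Claim_equal_isSupperUpper : Prop := ∀ (num : Int), Dom_isSupperUpper num → Spec_isSupperUpper num (isSupperUpper num)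

-- ===== LEMMAS AND PROOFS =====

-- set(l) of a duplicate-free list is l itself
theorem pvFoldlAdd {α : Type} [BEq α] [LawfulBEq α] (l acc : List α) (h : l.Nodup)
    (hd : ∀ x ∈ l, x ∉ acc) : l.foldl PySem.Set.add acc = acc ++ l := by
  induction l generalizing acc with
  | nil => simp
  | cons x xs ih =>
    simp only [List.foldl_cons]
    rw [PySem.Set.add_of_not_mem (hd x (by simp))]
    rw [ih (acc ++ [x]) (List.Nodup.of_cons h) ?_]
    · simp
    · intro y hy
      simp only [List.mem_append, List.mem_singleton]
      rintro (hya | rfl)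
      · exact hd y (by simp [hy]) hya
      · exact (List.nodup_cons.mp h).1 hy

theorem pvOfListEqSelf {α : Type} [BEq α] [LawfulBEq α] (l : List α) (h : l.Nodup) :
    PySem.Set.ofList l = l := by
  rw [PySem.Set.ofList_eq_foldl, pvFoldlAdd l [] h (by simp)]; simp

-- the adjacent-pair scan equals "l is strictly increasing"
theorem pvScanIffPairwise (l : List Char) :
    ((PySem.List.pyRange 1 (l.length : Int) 1).all
      (fun index => decide (PySem.List.pyGetD l (index - 1) ' ' < PySem.List.pyGetD l index ' '))) = true
    ↔ l.Pairwise (· < ·) := by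
  rw [← List.isChain_iff_pairwise, List.isChain_iff_getElem, List.all_eq_true]
  constructor
  · intro h i hi
    have := h ((i : Int) + 1) (by rw [PySem.List.mem_pyRange_one]; push_cast; omega)
    have e : ((i : Int) + 1 - 1) = (i : Int) := by ring
    rw [e, PySem.List.pyGetD_eq_getElem l ' ' (by omega) (by omega),
        PySem.List.pyGetD_eq_getElem l ' ' (by omega) (by omega)] at this
    simp only [decide_eq_true_eq] at this
    simpa using this
  · intro h i hi
    rw [PySem.List.mem_pyRange_one] at hi
    rw [PySem.List.pyGetD_eq_getElem l ' ' (by omega) (by omega),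
        PySem.List.pyGetD_eq_getElem l ' ' (by omega) (by omega)]
    simp only [decide_eq_true_eq]
    have := h (i - 1).toNat (by omega)
    convert this using 2
    omega

-- strictly increasing iff equal to sorted(set(l))
theorem pvPairwiseIffSortedSet (l : List Char) :
    l.Pairwise (· < ·) ↔ l = PySem.List.sorted (PySem.Set.ofList l) (fun c => c) false := by
  constructor
  · intro h
    have hnd : l.Nodup := h.nodup
    rw [pvOfListEqSelf l hnd]
    exact (PySem.List.sorted_eq_of_perm_of_pairwise_lt l l (fun c => c) (List.Perm.refl l) h).symm
  · intro h
    rw [h]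
    exact PySem.List.sorted_ofList_pairwise_lt l

-- ===== VERDICT (by name: the statement is the Claim_ definition above) =====
theorem isSupperUpper_spec : Claim_equal_isSupperUpper := by
  intro num _
  unfold Spec_isSupperUpper isSupperUpper isSupperUpper_alt
  set l := PySem.Int.toChars (num * num) with hl
  by_cases hlen : l.length > 10
  · simp [hlen]
  · simp only [hlen, if_false]
    rw [Bool.eq_iff_iff, decide_eq_true_eq]
    exact (pvScanIffPairwise l).trans (pvPairwiseIffSortedSet l)
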